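-- pv_equiv track=rewrite | github.com/sonmessia/DSA-Hutech | 1923.py | count_valid_x
-- ===== SOURCE A (Python) =====
-- import math
-- from functools import reduce
--
-- def get_divisors(n):
--     divisors = []
--     for i in range(1, int(math.sqrt(n)) + 1):
--         if n % i == 0:
--             divisors.append(i)
--             if i != n // i:
--                 divisors.append(n // i)
--     return sorted(divisors)
--
-- def binary_search(arr, target):
--     left, right = 0, len(arr) - 1
--     while left <= right:
--         mid = (left + right) // 2
--         if arr[mid] >= target:
--             right = mid - 1
--         else:
--             left = mid + 1
--     return left
--
-- def count_valid_x(A, B):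
--
--     gcd_a = reduce(math.gcd, A)
--
--     lcm_b = reduce(lambda x, y: x * y // math.gcd(x, y), B)
--
--     if lcm_b > gcd_a:
--         return 0
--
--     divisors = get_divisors(gcd_a)
--
--     start_idx = binary_search(divisors, lcm_b)
--
--     count = 0
--     for i in range(start_idx, len(divisors)):
--         if divisors[i] % lcm_b == 0:
--             count += 1
--
--     return count
-- ===== SOURCE B (Python) =====
-- from math import gcd, isqrt
-- from functools import reduce
--
--
-- def count_valid_x(A, B):
--     # Count divisors of gcd(A) that are multiples of lcm(B), in one
--     # sqrt-paired counting pass: no divisor list, no sort, no binary search.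
--     g = reduce(gcd, A)
--     l = reduce(lambda x, y: x * y // gcd(x, y), B)
--     if l > g:
--         return 0
--     count = 0
--     for i in range(1, isqrt(g) + 1):
--         if g % i == 0:
--             if i % l == 0:
--                 count += 1
--             j = g // i
--             if j != i and j % l == 0:
--                 count += 1
--     return count
-- ===== Notes on version B (the rewrite author's own statement) =====
-- stated objective: simpler
-- what changed: B counts the qualifying divisors directly in one sqrt-paired pass with O(1) memory (after the same lcm>gcd early-out), eliminating A's divisor list, its sort, the binary search and the final filter loop.
import Mathlib
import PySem

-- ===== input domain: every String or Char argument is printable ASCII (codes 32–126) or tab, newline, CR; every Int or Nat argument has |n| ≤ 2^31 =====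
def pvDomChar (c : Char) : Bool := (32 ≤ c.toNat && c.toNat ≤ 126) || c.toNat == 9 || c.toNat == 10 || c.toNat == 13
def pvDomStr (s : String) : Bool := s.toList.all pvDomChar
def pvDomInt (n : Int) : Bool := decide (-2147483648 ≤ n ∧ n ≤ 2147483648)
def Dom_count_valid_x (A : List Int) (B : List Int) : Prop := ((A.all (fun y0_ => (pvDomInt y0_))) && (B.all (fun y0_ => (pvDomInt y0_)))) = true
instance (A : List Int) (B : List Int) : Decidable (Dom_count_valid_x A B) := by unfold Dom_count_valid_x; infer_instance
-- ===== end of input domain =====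

-- B replaces A's divisor list + sort + binary search + filter loop by one sqrt-paired counting
-- pass after the same lcm>gcd early-out (objective: simpler); equal on Pre_ (proved below).

-- ===== PORT A =====
-- reduce(math.gcd, A): on a nonempty list, the seed is the raw first element
def pvReduceGcd (A : List Int) : Int :=
  match A with
  | [] => 0          -- Python raises TypeError on an empty list (excluded by Pre_)
  | a :: t => t.foldl (fun x y => (Int.gcd x y : Int)) a

-- reduce(lambda x, y: x * y // gcd(x, y), B); floordiv-by-0 (two zeros in B) raises in Python (excluded by Pre_)
def pvReduceLcm (B : List Int) : Int :=
  match B with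
  | [] => 0          -- Python raises TypeError on an empty list (excluded by Pre_)
  | b :: t => t.foldl (fun x y => PySem.Int.floordiv (x * y) (Int.gcd x y)) b

-- the loop body of get_divisors
def pvDivStep (n : Int) (ds : List Int) (i : Int) : List Int :=
  if PySem.Int.mod n i = 0 then
    let ds1 := ds ++ [i]
    if i ≠ PySem.Int.floordiv n i then ds1 ++ [PySem.Int.floordiv n i] else ds1
  else ds

-- the `divisors` list built by get_divisors before the final sorted();
-- int(math.sqrt(n)) = Nat.sqrt n.toNat, exact for the 0 ≤ n ≤ 2^31 reached under Dom ∧ Pre_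
def pvRawDivisors (n : Int) : List Int :=
  (PySem.List.pyRange 1 ((Nat.sqrt n.toNat : Int) + 1)).foldl (pvDivStep n) []

def pvGetDivisors (n : Int) : List Int :=
  PySem.List.sorted (pvRawDivisors n) (fun x => x) false

-- binary_search's while loop; arr[mid] is always in range when reached, so pyGetD's default is never used
def pvBSGo (arr : List Int) (target left right : Int) : Int :=
  if h : left ≤ right then
    -- mid = (left + right) // 2, written inline at each use
    if PySem.List.pyGetD arr (PySem.Int.floordiv (left + right) 2) 0 ≥ target then
      pvBSGo arr target left (PySem.Int.floordiv (left + right) 2 - 1)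
    else
      pvBSGo arr target (PySem.Int.floordiv (left + right) 2 + 1) right
  else left
termination_by (right + 1 - left).toNat
decreasing_by
  · have := PySem.Int.floordiv_two_mid_bounds h; omega
  · have := PySem.Int.floordiv_two_mid_bounds h; omega

def pvBinarySearch (arr : List Int) (target : Int) : Int :=
  pvBSGo arr target 0 ((arr.length : Int) - 1)

def count_valid_x (A : List Int) (B : List Int) : Int :=
  let gcd_a := pvReduceGcd A
  let lcm_b := pvReduceLcm B
  if lcm_b > gcd_a then 0
  else
    let divisors := pvGetDivisors gcd_a
    let start_idx := pvBinarySearch divisors lcm_b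
    (PySem.List.pyRange start_idx (divisors.length : Int)).foldl
      (fun count i =>
        if PySem.Int.mod (PySem.List.pyGetD divisors i 0) lcm_b = 0 then count + 1 else count) 0

-- ===== PORT B =====
def count_valid_x_alt (A : List Int) (B : List Int) : Int :=
  let g := pvReduceGcd A
  let l := pvReduceLcm B
  if l > g then 0
  else
    (PySem.List.pyRange 1 ((Nat.sqrt g.toNat : Int) + 1)).foldl
      (fun count i =>
        if PySem.Int.mod g i = 0 then
          let count1 := if PySem.Int.mod i l = 0 then count + 1 else count
          let j := PySem.Int.floordiv g i
          if j ≠ i ∧ PySem.Int.mod j l = 0 then count1 + 1 else count1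
        else count) 0

-- ===== PRECONDITION & SPEC =====
-- Pre_ excludes exactly the inputs on which A RAISES: empty A or B (TypeError in reduce), two zeros
-- in B (ZeroDivisionError in the lcm reduce), one zero in B unless A is all-zero or a negative
-- singleton (ZeroDivisionError in `% lcm_b`), and a negative singleton A = [a] with lcm_b ≤ a,
-- where math.sqrt(a) raises ValueError.
def Pre_count_valid_x (A : List Int) (B : List Int) : Prop :=
  A ≠ [] ∧ B ≠ [] ∧ B.count 0 ≤ 1 ∧
    (B.count 0 = 1 → (∀ a ∈ A, a = 0) ∨ (A.length = 1 ∧ A.getD 0 0 < 0)) ∧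
    (A.length = 1 → A.getD 0 0 < 0 → A.getD 0 0 < pvReduceLcm B)
instance (A : List Int) (B : List Int) : Decidable (Pre_count_valid_x A B) := by
  unfold Pre_count_valid_x; infer_instance

def pvWitness_count_valid_x : List Int × List Int := ([12, 24], [2, 3])

def Spec_count_valid_x (A : List Int) (B : List Int) (out : Int) : Prop := out = count_valid_x_alt A B
instance (A : List Int) (B : List Int) (out : Int) : Decidable (Spec_count_valid_x A B out) := by unfold Spec_count_valid_x; infer_instance

-- ===== CLAIM (what is proved, stated in full; the proofs are below) =====
def Claim_equal_count_valid_x : Prop := ∀ (A : List Int) (B : List Int), Dom_count_valid_x A B → Pre_count_valid_x A B → Spec_count_valid_x A B (count_valid_x A B)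

-- ===== LEMMAS AND PROOFS =====

-- the predicate "d % lcm_b == 0" both programs count with
def pvP (l : Int) : Int → Bool := fun d => decide (PySem.Int.mod d l = 0)

theorem pv_foldl_gcd_nonneg (t : List Int) (x : Int) (h : t ≠ []) :
    0 ≤ t.foldl (fun x y => (Int.gcd x y : Int)) x := by
  induction t generalizing x with
  | nil => simp at h
  | cons y t' ih =>
    rw [List.foldl_cons]
    cases t' with
    | nil => simpa using Int.natCast_nonneg (Int.gcd x y)
    | cons z t'' => exact ih (Int.gcd x y) (by simp)

theorem pvReduceGcd_zero (A : List Int) (h : ∀ a ∈ A, a = 0) : pvReduceGcd A = 0 := by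
  cases A with
  | nil => rfl
  | cons a t =>
    simp only [pvReduceGcd]
    have ha : a = 0 := h a (by simp)
    subst ha
    have ht : ∀ b ∈ t, b = 0 := fun b hb => h b (by simp [hb])
    clear h
    induction t with
    | nil => rfl
    | cons y t' ih =>
      rw [List.foldl_cons]
      have hy : y = 0 := ht y (by simp)
      subst hy
      simpa [Int.gcd] using ih (fun b hb => ht b (by simp [hb]))

theorem pv_lcm_step_ne_zero {x y : Int} (hx : x ≠ 0) (hy : y ≠ 0) :
    PySem.Int.floordiv (x * y) (Int.gcd x y) ≠ 0 := by
  have hgne : Int.gcd x y ≠ 0 := fun h => hx (Int.gcd_eq_zero_iff.mp h).1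
  have hg : (0:Int) < (Int.gcd x y : Int) := by exact_mod_cast Nat.pos_of_ne_zero hgne
  rw [PySem.Int.floordiv_eq_ediv_of_pos hg]
  have hdvd : ((Int.gcd x y : Nat) : Int) ∣ x * y := (Int.gcd_dvd_left x y).mul_right y
  intro h0
  have hmc := Int.ediv_mul_cancel hdvd
  rw [h0, zero_mul] at hmc
  exact mul_ne_zero hx hy hmc.symm

theorem pv_divfold_bounds (g : Int) (hg : 0 < g) (L : List Int) :
    ∀ (acc : List Int), (∀ d ∈ acc, 1 ≤ d ∧ d ≤ g) → (∀ i ∈ L, 1 ≤ i) →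
    ∀ d ∈ L.foldl (pvDivStep g) acc, 1 ≤ d ∧ d ≤ g := by
  induction L with
  | nil => intro acc ha _; simpa using ha
  | cons i L' ih =>
    intro acc ha hL
    rw [List.foldl_cons]
    refine ih _ ?_ (fun j hj => hL j (by simp [hj]))
    intro d hd
    by_cases hmod : PySem.Int.mod g i = 0
    · have hi1 : 1 ≤ i := hL i (by simp)
      have hdv : i ∣ g := (PySem.Int.mod_eq_zero_iff_dvd g i).mp hmod
      have hig : i ≤ g := Int.le_of_dvd hg hdv
      have hfd : PySem.Int.floordiv g i = g / i :=
        PySem.Int.floordiv_eq_ediv_of_pos (by omega)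
      have hji : g / i * i = g := Int.ediv_mul_cancel hdv
      have hj1 : 1 ≤ g / i := by nlinarith
      have hjg : g / i ≤ g := Int.ediv_le_self i hg.le
      simp only [pvDivStep, if_pos hmod, hfd] at hd
      by_cases hne : i ≠ g / i
      · rw [if_pos hne] at hd
        rcases List.mem_append.mp hd with h1 | h2
        · rcases List.mem_append.mp h1 with h3 | h4
          · exact ha d h3
          · have : d = i := by simpa using h4
            omega
        · have : d = g / i := by simpa using h2
          omega
      · rw [if_neg hne] at hd
        rcases List.mem_append.mp hd with h1 | h2
        · exact ha d h1
        · have : d = i := by simpa using h2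
          omega
    · simp only [pvDivStep, if_neg hmod] at hd
      exact ha d hd

theorem pvReduceLcm_ne_zero (B : List Int) (hB : B ≠ []) (h : ∀ b ∈ B, b ≠ 0) :
    pvReduceLcm B ≠ 0 := by
  cases B with
  | nil => simp at hB
  | cons b t =>
    simp only [pvReduceLcm]
    have hb : b ≠ 0 := h b (by simp)
    have ht : ∀ y ∈ t, y ≠ 0 := fun y hy => h y (by simp [hy])
    clear h hB
    induction t generalizing b with
    | nil => simpa using hb
    | cons y t' ih =>
      rw [List.foldl_cons]
      have hy : y ≠ 0 := ht y (by simp)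
      exact ih _ (pv_lcm_step_ne_zero hb hy) (fun z hz => ht z (by simp [hz]))

theorem pvRawDivisors_bounds (g : Int) (hg : 0 < g) :
    ∀ d ∈ pvRawDivisors g, 1 ≤ d ∧ d ≤ g := by
  unfold pvRawDivisors
  exact pv_divfold_bounds g hg _ [] (by simp)
    (fun i hi => (PySem.List.mem_pyRange_one.mp hi).1)

-- B's counting fold counts exactly the elements A's list-building fold appends
theorem pv_bcount_eq (g l : Int) (L : List Int) :
    ∀ (acc : List Int) (c : Int),
    L.foldl (fun count i =>
        if PySem.Int.mod g i = 0 then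
          let count1 := if PySem.Int.mod i l = 0 then count + 1 else count
          let j := PySem.Int.floordiv g i
          if j ≠ i ∧ PySem.Int.mod j l = 0 then count1 + 1 else count1
        else count) c
      + ((acc.countP (pvP l) : Nat) : Int)
      = c + (((L.foldl (pvDivStep g) acc).countP (pvP l) : Nat) : Int) := by
  induction L with
  | nil => intro acc c; simp
  | cons i L' ih =>
    intro acc c
    rw [List.foldl_cons, List.foldl_cons]
    have h := ih (pvDivStep g acc i)
      (if PySem.Int.mod g i = 0 then
        let count1 := if PySem.Int.mod i l = 0 then c + 1 else c
        let j := PySem.Int.floordiv g i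
        if j ≠ i ∧ PySem.Int.mod j l = 0 then count1 + 1 else count1
      else c)
    have hstep :
        (if PySem.Int.mod g i = 0 then
          let count1 := if PySem.Int.mod i l = 0 then c + 1 else c
          let j := PySem.Int.floordiv g i
          if j ≠ i ∧ PySem.Int.mod j l = 0 then count1 + 1 else count1
        else c)
          + ((acc.countP (pvP l) : Nat) : Int)
        = c + (((pvDivStep g acc i).countP (pvP l) : Nat) : Int) := by
      by_cases h1 : PySem.Int.mod g i = 0
      · by_cases h3 : i = PySem.Int.floordiv g i
        · by_cases h2 : PySem.Int.mod i l = 0 <;>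
            simp [pvDivStep, pvP, h1, h2, ← h3, List.countP_append] <;>
              omega
        · have h3' : PySem.Int.floordiv g i ≠ i := fun hh => h3 hh.symm
          by_cases h2 : PySem.Int.mod i l = 0 <;>
            by_cases h4 : PySem.Int.mod (PySem.Int.floordiv g i) l = 0 <;>
              simp [pvDivStep, pvP, h1, h2, h3, h3', h4, List.countP_append] <;>
                omega
      · simp [pvDivStep, h1]
    omega

-- indexing a list over range(len) counts the same elements as the list itself
theorem pv_countP_idx (xs : List Int) (pb : Int → Bool) :
    (List.range xs.length).countP (fun k => pb (xs.getD k 0)) = xs.countP pb := by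
  induction xs using List.reverseRecOn with
  | nil => simp
  | append_singleton ys y ih =>
    rw [List.length_append, List.length_singleton, List.range_succ, List.countP_append,
      List.countP_append]
    have h1 : (List.range ys.length).countP (fun k => pb ((ys ++ [y]).getD k 0))
        = (List.range ys.length).countP (fun k => pb (ys.getD k 0)) := by
      refine List.countP_congr (fun k hk => ?_)
      rw [List.getD_append ys [y] 0 k (List.mem_range.mp hk)]
    have h2 : ((ys ++ [y]).getD ys.length 0) = y := by
      rw [List.getD_append_right ys [y] 0 ys.length le_rfl]
      simp
    rw [h1, ih]
    simp

theorem pv_pairwise_getElem (xs : List Int) (hp : List.Pairwise (· ≤ ·) xs) :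
    ∀ (p q : Nat), (hpq : p ≤ q) → (hq : q < xs.length) → xs[p]'(by omega) ≤ xs[q]'hq := by
  intro p q hpq hq
  rcases Nat.eq_or_lt_of_le hpq with rfl | hlt
  · exact le_rfl
  · exact List.pairwise_iff_getElem.mp hp p q (by omega) hq hlt

-- binary_search invariant: everything strictly left of the result is < target
theorem pv_bs_spec (arr : List Int) (t : Int)
    (hmono : ∀ (p q : Nat), (hpq : p ≤ q) → (hq : q < arr.length) → arr[p]'(by omega) ≤ arr[q]'hq) :
    ∀ (n : Nat) (left right : Int), (right + 1 - left).toNat ≤ n →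
    0 ≤ left → right < (arr.length : Int) → left ≤ right + 1 →
    (∀ (k : Nat), (k : Int) < left → (hk : k < arr.length) → arr[k] < t) →
    left ≤ pvBSGo arr t left right ∧ pvBSGo arr t left right ≤ right + 1 ∧
      (∀ (k : Nat), (k : Int) < pvBSGo arr t left right → (hk : k < arr.length) → arr[k] < t) := by
  intro n
  induction n with
  | zero =>
    intro left right hm h0 hlen hlr hpre
    have hnle : ¬ left ≤ right := by omega
    rw [pvBSGo, dif_neg hnle]
    exact ⟨le_rfl, by omega, hpre⟩
  | succ n ih =>
    intro left right hm h0 hlen hlr hpre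
    by_cases h : left ≤ right
    · have hmid := PySem.Int.floordiv_two_mid_bounds h
      rw [pvBSGo, dif_pos h]
      split_ifs with hge
      · obtain ⟨ha, hb, hc⟩ := ih left (PySem.Int.floordiv (left + right) 2 - 1)
          (by omega) h0 (by omega) (by omega) hpre
        exact ⟨ha, by omega, hc⟩
      · rw [not_le] at hge
        have hmlen : PySem.Int.floordiv (left + right) 2 < (arr.length : Int) := by omega
        have h0m : (0:Int) ≤ PySem.Int.floordiv (left + right) 2 := by omega
        have harr : PySem.List.pyGetD arr (PySem.Int.floordiv (left + right) 2) 0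
            = arr[(PySem.Int.floordiv (left + right) 2).toNat]'(by omega) :=
          PySem.List.pyGetD_eq_getElem arr 0 h0m hmlen
        have hpre' : ∀ (k : Nat), (k : Int) < PySem.Int.floordiv (left + right) 2 + 1 →
            (hk : k < arr.length) → arr[k] < t := by
          intro k hk hkl
          rcases lt_or_ge (k : Int) left with h' | h'
          · exact hpre k h' hkl
          · have hmono' := hmono k (PySem.Int.floordiv (left + right) 2).toNat
              (by omega) (by omega)
            omega
        obtain ⟨ha, hb, hc⟩ := ih (PySem.Int.floordiv (left + right) 2 + 1) right
          (by omega) (by omega) hlen (by omega) hpre'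
        exact ⟨by omega, hb, hc⟩
    · rw [pvBSGo, dif_neg h]
      exact ⟨le_rfl, by omega, hpre⟩

-- ===== VERDICT (by name: the statement is the Claim_ definition above) =====
theorem count_valid_x_spec : Claim_equal_count_valid_x := by
  intro A B _ hpre
  obtain ⟨hA, hB, hc1, hz, hsneg⟩ := hpre
  unfold Spec_count_valid_x
  simp only [count_valid_x, count_valid_x_alt]
  have hsingle : A.length = 1 → pvReduceGcd A = A.getD 0 0 := by
    intro h1
    match A, h1 with
    | [a], _ => rfl
  generalize hgdef : pvReduceGcd A = g
  generalize hldef : pvReduceLcm B = l at hsneg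
  rw [hgdef] at hsingle
  split_ifs with hlg
  · rfl
  · -- else branch of both: lcm_b ≤ gcd_a, so g ≥ 0 on Pre_
    have hg0 : 0 ≤ g := by
      cases A with
      | nil => simp at hA
      | cons a t =>
        cases t with
        | nil =>
          have hga : g = a := by simpa using hsingle (by simp)
          by_contra hneg
          have h := hsneg (by simp) (by simp [List.getD]; omega)
          simp [List.getD] at h
          omega
        | cons b t' =>
          rw [← hgdef]
          exact pv_foldl_gcd_nonneg _ _ (by simp)
    rcases eq_or_lt_of_le hg0 with hg | hg
    · -- gcd_a = 0 : both sides are 0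
      subst hg
      rw [show pvGetDivisors 0 = [] by decide]
      have hbs : pvBinarySearch ([] : List Int) l = 0 := by
        rw [pvBinarySearch, pvBSGo]
        norm_num
      rw [hbs]
      simp [PySem.List.pyRange_one_eq_nil le_rfl]
    · -- 0 < gcd_a : lcm_b ≠ 0, and both sides count the same divisors
      have hl0 : l ≠ 0 := by
        intro hl
        have hex : ∃ b ∈ B, b = 0 := by
          by_contra hno
          exact (hldef ▸ pvReduceLcm_ne_zero B hB
            (fun b hb hb0 => hno ⟨b, hb, hb0⟩)) hl
        obtain ⟨b, hbB, hb0⟩ := hex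
        subst hb0
        have hcp : 0 < B.count 0 := List.count_pos_iff.mpr hbB
        rcases hz (by omega) with hall | ⟨h1, hneg⟩
        · have hgz := pvReduceGcd_zero A hall
          rw [hgdef] at hgz
          omega
        · have := hsingle h1
          omega
      have hbounds := pvRawDivisors_bounds g hg
      have hperm : (pvGetDivisors g).Perm (pvRawDivisors g) := PySem.List.sorted_perm _ _ _
      have hmem : ∀ d ∈ pvGetDivisors g, 1 ≤ d ∧ d ≤ g := fun d hd =>
        hbounds d (hperm.mem_iff.mp hd)
      have hpw : List.Pairwise (· ≤ ·) (pvGetDivisors g) := by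
        simpa [pvGetDivisors] using PySem.List.sorted_pairwise (pvRawDivisors g) (fun x => x)
      have hmono := pv_pairwise_getElem _ hpw
      have hcnt := hperm.countP_eq (pvP l)
      -- B's loop value
      have hbval := pv_bcount_eq g l
        (PySem.List.pyRange 1 (((Nat.sqrt g.toNat) : Int) + 1)) [] 0
      simp only [List.countP_nil, Nat.cast_zero, add_zero, zero_add] at hbval
      rw [show (PySem.List.pyRange 1 (((Nat.sqrt g.toNat) : Int) + 1)).foldl (pvDivStep g) []
            = pvRawDivisors g from rfl] at hbval
      rw [hbval]
      obtain ⟨hs0, hs1, hspre⟩ := pv_bs_spec (pvGetDivisors g) l hmono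
        ((((pvGetDivisors g).length : Int) - 1 + 1 - 0).toNat) 0
        (((pvGetDivisors g).length : Int) - 1)
        le_rfl le_rfl (by omega) (by omega) (fun k hk _ => absurd hk (by omega))
      simp only [pvBinarySearch]
      rw [PySem.List.foldl_ite_add_one
        (fun i => PySem.Int.mod (PySem.List.pyGetD (pvGetDivisors g) i 0) l = 0)]
      set s' := pvBSGo (pvGetDivisors g) l 0 (((pvGetDivisors g).length : Int) - 1) with hs'
      have hsplit := PySem.List.pyRange_one_append 0 s' ((pvGetDivisors g).length : Int)
        hs0 (by omega)
      have htot : (PySem.List.pyRange 0 ((pvGetDivisors g).length : Int)).countP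
          (fun i => decide (PySem.Int.mod (PySem.List.pyGetD (pvGetDivisors g) i 0) l = 0))
          = (pvGetDivisors g).countP (pvP l) := by
        rw [PySem.List.pyRange_zero_nat, List.countP_map]
        refine Eq.trans ?_ (pv_countP_idx (pvGetDivisors g) (pvP l))
        refine List.countP_congr (fun k hk => ?_)
        simp [pvP, PySem.List.pyGetD_natCast]
      have hprefix : (PySem.List.pyRange 0 s').countP
          (fun i => decide (PySem.Int.mod (PySem.List.pyGetD (pvGetDivisors g) i 0) l = 0))
          = 0 := by
        refine List.countP_eq_zero.mpr (fun i hi => ?_)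
        obtain ⟨hi0, his⟩ := PySem.List.mem_pyRange_one.mp hi
        have hilen : i < ((pvGetDivisors g).length : Int) := by omega
        have hget : PySem.List.pyGetD (pvGetDivisors g) i 0
            = (pvGetDivisors g)[i.toNat]'(by omega) :=
          PySem.List.pyGetD_eq_getElem _ 0 hi0 hilen
        have hlt := hspre i.toNat (by omega) (by omega)
        have hmem' := hmem ((pvGetDivisors g)[i.toNat]'(by omega)) (List.getElem_mem _)
        simp only [hget, decide_eq_true_eq]
        intro hmod
        have hdvd : l ∣ (pvGetDivisors g)[i.toNat]'(by omega) :=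
          (PySem.Int.mod_eq_zero_iff_dvd _ l).mp hmod
        have := Int.le_of_dvd (by omega) hdvd
        omega
      rw [hsplit, List.countP_append, hprefix] at htot
      omega
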